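-- pv_equiv track=rewrite | github.com/Shikher-jain/SJ_MAIN | CODEVITA  TCS/Good_String.py | totalDist
-- ===== SOURCE A (Python) =====
-- def totalDist(name, GoodStr):
--     Distance = 0
--     PrevGood = GoodStr[0]
--
--     for char in name:
--         if char in GoodStr:
--             PrevGood = char
--             continue
--
--         MDistance = float('inf')
--         Best = None
--
--         for Good in GoodStr:
--             distance = abs(ord(char) - ord(Good))
--
--             if distance < MDistance:
--                 MDistance = distance
--                 Best = Good
--             elif distance == MDistance:
--                 if abs(ord(PrevGood) - ord(Good)) < abs(ord(PrevGood) - ord(Best)):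
--                     Best = Good
--
--         Distance += MDistance
--         PrevGood = Best
--     return Distance
-- ===== SOURCE B (Python) =====
-- def _bisect_left(codes, x):
--     # textbook bisect_left (the stdlib loop; A imports nothing, so written out)
--     lo, hi = 0, len(codes)
--     while lo < hi:
--         mid = (lo + hi) // 2
--         if codes[mid] < x:
--             lo = mid + 1
--         else:
--             hi = mid
--     return lo
--
-- def totalDist(name, GoodStr):
--     codes = sorted(set(map(ord, GoodStr)))   # distinct good codes, ascending
--     good = set(GoodStr)
--     total = 0
--     for ch in name:
--         if ch in good:
--             continue
--         c = ord(ch)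
--         i = _bisect_left(codes, c)
--         if i == 0:
--             total += codes[0] - c
--         elif i == len(codes):
--             total += c - codes[-1]
--         else:
--             total += min(c - codes[i - 1], codes[i] - c)
--     return total
-- ===== Notes on version B (the rewrite author's own statement) =====
-- stated objective: alternative
-- what changed: A rescans all of GoodStr for every non-good character (carrying a PrevGood/Best tie-break that never affects the returned sum); B builds a sorted list of the distinct good character codes once and answers each character with a hand-written binary search over that index, adding min(|c-left|,|c-right|).
import Mathlib
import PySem

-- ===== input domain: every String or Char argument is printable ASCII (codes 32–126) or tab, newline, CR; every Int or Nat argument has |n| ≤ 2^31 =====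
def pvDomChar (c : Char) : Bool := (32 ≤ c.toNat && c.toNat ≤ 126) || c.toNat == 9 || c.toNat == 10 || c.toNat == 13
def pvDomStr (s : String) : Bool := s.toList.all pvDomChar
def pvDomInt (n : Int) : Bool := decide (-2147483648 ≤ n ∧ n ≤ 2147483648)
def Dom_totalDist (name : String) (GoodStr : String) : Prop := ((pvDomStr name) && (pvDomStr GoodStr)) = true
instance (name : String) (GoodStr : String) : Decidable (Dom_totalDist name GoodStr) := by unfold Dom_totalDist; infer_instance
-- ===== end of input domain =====

-- B replaces A's per-character rescan of GoodStr (with its dead PrevGood tie-break) by a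
-- sorted distinct-code index queried with binary search; same return value on every input
-- where A returns (GoodStr nonempty).

-- ===== PORT A =====
-- inner loop body of A: state (MDistance, Best); MDistance = none is float('inf'), Best = none is None.
-- In the 'elif' branch Best is necessarily 'some' (MDistance is 'some' there); 'b.getD g' writes
-- that unreachable-in-Python 'ord(None)' case off arbitrarily.
def pvInnerStep (c prev : Char) (st : Option Int × Option Char) (g : Char) : Option Int × Option Char :=
  let d : Int := |((c.toNat : Int)) - ((g.toNat : Int))|
  match st with
  | (none, _) => (some d, some g)
  | (some m, b) =>
    if d < m then (some d, some g)
    else if d = m then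
      if |((prev.toNat : Int)) - ((g.toNat : Int))| < |((prev.toNat : Int)) - (((b.getD g).toNat : Int))| then (some m, some g)
      else (some m, b)
    else (some m, b)

-- outer loop body of A: state (Distance, PrevGood); 'char in GoodStr' is single-char membership
def pvOuterStep (gs : List Char) (st : Int × Char) (ch : Char) : Int × Char :=
  if gs.contains ch then (st.1, ch)
  else
    let r := gs.foldl (pvInnerStep ch st.2) (none, none)
    (st.1 + r.1.getD 0, r.2.getD st.2)

def totalDist (name : String) (GoodStr : String) : Int :=
  match GoodStr.toList with
  | [] => 0   -- Python raises IndexError at GoodStr[0]; excluded by Pre_totalDist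
  | p0 :: _ => (name.toList.foldl (pvOuterStep GoodStr.toList) (0, p0)).1

-- ===== PORT B =====
-- Source B's _bisect_left is the textbook lo/hi halving loop, which is exactly PySem.List.bisectLeft
def pvAltStep (good : PySem.Set Char) (codes : List Int) (total : Int) (ch : Char) : Int :=
  if PySem.Set.contains good ch then total
  else
    let c : Int := (ch.toNat : Int)
    let i := PySem.List.bisectLeft codes c
    if i = 0 then total + (codes.getD 0 0 - c)
    else if i = codes.length then total + (c - codes.getD (codes.length - 1) 0)
    else total + min (c - codes.getD (i - 1) 0) (codes.getD i 0 - c)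

def totalDist_alt (name : String) (GoodStr : String) : Int :=
  name.toList.foldl
    (pvAltStep (PySem.Set.ofList GoodStr.toList)
      (PySem.List.sorted (PySem.Set.ofList (GoodStr.toList.map (fun g => ((g.toNat : Int))))) (fun x => x) false)) 0

-- ===== PRECONDITION & SPEC =====
-- Pre_ excludes exactly GoodStr = "", on which Python A raises IndexError at GoodStr[0].
def Pre_totalDist (name : String) (GoodStr : String) : Prop := GoodStr ≠ ""
instance (name : String) (GoodStr : String) : Decidable (Pre_totalDist name GoodStr) := by unfold Pre_totalDist; infer_instance
def pvWitness_totalDist : String × String := ("hi!", "abc")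

def Spec_totalDist (name : String) (GoodStr : String) (out : Int) : Prop := out = totalDist_alt name GoodStr
instance (name : String) (GoodStr : String) (out : Int) : Decidable (Spec_totalDist name GoodStr out) := by unfold Spec_totalDist; infer_instance

-- ===== CLAIM (what is proved, stated in full; the proofs are below) =====
def Claim_equal_totalDist : Prop := ∀ (name : String) (GoodStr : String), Dom_totalDist name GoodStr → Pre_totalDist name GoodStr → Spec_totalDist name GoodStr (totalDist name GoodStr)

-- ===== LEMMAS AND PROOFS =====

-- minimum of |c - g| over a nonempty code list (reference value both sides are reduced to)
def pvMinD (c : Int) : List Int → Int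
  | [] => 0
  | x :: xs => xs.foldl (fun m y => min m |c - y|) |c - x|

def pvSumC (f : Char → Int) : List Char → Int
  | [] => 0
  | ch :: t => f ch + pvSumC f t

def pvContribA (gs : List Char) (ch : Char) : Int :=
  if gs.contains ch then 0 else pvMinD ((ch.toNat : Int)) (gs.map (fun g => ((g.toNat : Int))))

lemma pvFoldlMin_spec (c : Int) :
    ∀ (l : List Int) (m : Int),
      (l.foldl (fun m y => min m |c - y|) m = m ∨
        ∃ g ∈ l, l.foldl (fun m y => min m |c - y|) m = |c - g|) ∧
      l.foldl (fun m y => min m |c - y|) m ≤ m ∧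
      ∀ g ∈ l, l.foldl (fun m y => min m |c - y|) m ≤ |c - g| := by
  intro l
  induction l with
  | nil => intro m; simp
  | cons y t ih =>
    intro m
    obtain ⟨h1, h2, h3⟩ := ih (min m |c - y|)
    refine ⟨?_, ?_, ?_⟩
    · rcases h1 with h | ⟨g, hg, hgeq⟩
      · rcases le_total m |c - y| with hle | hle
        · left; simpa [min_eq_left hle] using h
        · right; exact ⟨y, by simp, by simpa [min_eq_right hle] using h⟩
      · right; exact ⟨g, by simp [hg], hgeq⟩
    · calc t.foldl (fun m y => min m |c - y|) (min m |c - y|) ≤ min m |c - y| := h2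
        _ ≤ m := min_le_left _ _
    · intro g hg
      rcases List.mem_cons.mp hg with rfl | hg
      · calc t.foldl (fun m y => min m |c - y|) (min m |c - g|) ≤ min m |c - g| := h2
          _ ≤ |c - g| := min_le_right _ _
      · exact h3 g hg

lemma pvMinD_spec (c : Int) (l : List Int) (h : l ≠ []) :
    (∃ g ∈ l, pvMinD c l = |c - g|) ∧ ∀ g ∈ l, pvMinD c l ≤ |c - g| := by
  cases l with
  | nil => exact absurd rfl h
  | cons x xs =>
    obtain ⟨h1, _, h3⟩ := pvFoldlMin_spec c xs |c - x|
    refine ⟨?_, ?_⟩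
    · rcases h1 with heq | ⟨g, hg, hgeq⟩
      · exact ⟨x, by simp, heq⟩
      · exact ⟨g, by simp [hg], hgeq⟩
    · intro g hg
      rcases List.mem_cons.mp hg with rfl | hg
      · exact (pvFoldlMin_spec c xs |c - g|).2.1
      · exact h3 g hg

lemma pvMinD_eq_of (c v : Int) (l : List Int) (h : l ≠ [])
    (hmem : ∃ g ∈ l, v = |c - g|) (hlb : ∀ g ∈ l, v ≤ |c - g|) :
    v = pvMinD c l := by
  obtain ⟨⟨g0, hg0, hg0eq⟩, hmin⟩ := pvMinD_spec c l h
  obtain ⟨g1, hg1, hg1eq⟩ := hmem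
  have h1 : v ≤ pvMinD c l := hg0eq ▸ hlb g0 hg0
  have h2 : pvMinD c l ≤ v := hg1eq ▸ hmin g1 hg1
  omega

lemma pvMinD_congr (c : Int) (l l' : List Int) (h : l ≠ []) (h' : l' ≠ [])
    (hm : ∀ x, x ∈ l ↔ x ∈ l') : pvMinD c l = pvMinD c l' := by
  obtain ⟨⟨g, hg, hgeq⟩, hmin⟩ := pvMinD_spec c l h
  exact pvMinD_eq_of c (pvMinD c l) l' h' ⟨g, (hm g).mp hg, hgeq⟩
    (fun x hx => hmin x ((hm x).mpr hx))

-- A's inner loop: the MDistance component is the running minimum, independent of PrevGood / Best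
lemma pvInner_fst (c prev : Char) :
    ∀ (gs : List Char) (m : Int) (b : Option Char),
      (gs.foldl (pvInnerStep c prev) (some m, b)).1 =
        some (gs.foldl (fun m g => min m |((c.toNat : Int)) - ((g.toNat : Int))|) m) := by
  intro gs
  induction gs with
  | nil => intro m b; simp
  | cons g t ih =>
    intro m b
    simp only [List.foldl_cons, pvInnerStep]
    set d : Int := |((c.toNat : Int)) - ((g.toNat : Int))| with hd
    by_cases h1 : d < m
    · simp only [if_pos h1]
      rw [ih]
      congr 2
      omega
    · simp only [if_neg h1]
      by_cases h2 : d = m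
      · simp only [if_pos h2]
        split
        · rw [ih]; congr 2; omega
        · rw [ih]; congr 2; omega
      · simp only [if_neg h2]
        rw [ih]; congr 2; omega

lemma pvInner_fst_nonempty (c prev : Char) (g : Char) (t : List Char) :
    ((g :: t).foldl (pvInnerStep c prev) (none, none)).1 =
      some (pvMinD ((c.toNat : Int)) ((g :: t).map (fun x => ((x.toNat : Int))))) := by
  simp only [List.foldl_cons, pvInnerStep]
  rw [pvInner_fst]
  simp only [pvMinD, List.map_cons]
  rw [List.foldl_map]

-- A's outer loop: Distance accumulates pvContribA, independently of PrevGood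
lemma pvOuter_fst (gs : List Char) (hne : gs ≠ []) :
    ∀ (chs : List Char) (dist : Int) (prev : Char),
      (chs.foldl (pvOuterStep gs) (dist, prev)).1 = dist + pvSumC (pvContribA gs) chs := by
  intro chs
  induction chs with
  | nil => intro dist prev; simp [pvSumC]
  | cons ch t ih =>
    intro dist prev
    simp only [List.foldl_cons, pvOuterStep, pvSumC, pvContribA]
    by_cases h : gs.contains ch
    · simp only [if_pos h]
      rw [ih]
      simp
    · simp only [if_neg h]
      obtain ⟨g0, t0, rfl⟩ : ∃ g0 t0, gs = g0 :: t0 := by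
        cases gs with
        | nil => exact absurd rfl hne
        | cons a b => exact ⟨a, b, rfl⟩
      rw [ih]
      rw [pvInner_fst_nonempty ch prev g0 t0]
      simp only [Option.getD_some]
      ring

-- B's fold accumulates its per-char contribution
lemma pvAlt_fold (good : PySem.Set Char) (codes : List Int) :
    ∀ (chs : List Char) (total : Int),
      chs.foldl (pvAltStep good codes) total = total + pvSumC (fun ch => pvAltStep good codes 0 ch) chs := by
  intro chs
  induction chs with
  | nil => intro total; simp [pvSumC]
  | cons ch t ih =>
    intro total
    simp only [List.foldl_cons, pvSumC]
    rw [ih]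
    have : pvAltStep good codes total ch = total + pvAltStep good codes 0 ch := by
      simp only [pvAltStep]
      split
      · ring
      · split
        · ring
        · split <;> ring
    rw [this]; ring

-- the bisect formula on a strictly sorted nonempty list is the minimum distance
lemma pvBisect_formula (codes : List Int) (hp : codes.Pairwise (· < ·)) (hne : codes ≠ []) (c : Int) :
    (if PySem.List.bisectLeft codes c = 0 then codes.getD 0 0 - c
     else if PySem.List.bisectLeft codes c = codes.length then c - codes.getD (codes.length - 1) 0
     else min (c - codes.getD (PySem.List.bisectLeft codes c - 1) 0) (codes.getD (PySem.List.bisectLeft codes c) 0 - c))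
      = pvMinD c codes := by
  have hple : codes.Pairwise (· ≤ ·) := hp.imp (fun h => le_of_lt h)
  obtain ⟨hile, hlt, hge⟩ := PySem.List.bisectLeft_spec codes c hple
  set i := PySem.List.bisectLeft codes c with hi
  have hlen : 0 < codes.length := List.length_pos_iff.mpr hne
  have hmono : ∀ (j k : ℕ) (hj : j < codes.length) (hk : k < codes.length), j ≤ k → codes[j] ≤ codes[k] := by
    intro j k hj hk hjk
    rcases Nat.lt_or_ge j k with h | h
    · exact le_of_lt (List.pairwise_iff_getElem.mp hp j k hj hk h)
    · have : j = k := by omega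
      subst this; exact le_refl _
  by_cases h0 : i = 0
  · simp only [if_pos h0]
    refine pvMinD_eq_of c _ codes hne ?_ ?_
    · refine ⟨codes[0], List.getElem_mem _, ?_⟩
      have := hge 0 hlen (by omega)
      rw [List.getD_eq_getElem codes 0 hlen]
      rcases abs_cases (c - codes[0]) with ⟨h1, h2⟩ | ⟨h1, h2⟩ <;> omega
    · intro g hg
      obtain ⟨j, hj, rfl⟩ := List.mem_iff_getElem.mp hg
      have h1 := hge j hj (by omega)
      have h2 := hmono 0 j hlen hj (by omega)
      rw [List.getD_eq_getElem codes 0 hlen]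
      rcases abs_cases (c - codes[j]) with ⟨h3, h4⟩ | ⟨h3, h4⟩ <;> omega
  · simp only [if_neg h0]
    by_cases hn : i = codes.length
    · simp only [if_pos hn]
      have hlast : codes.length - 1 < codes.length := by omega
      refine pvMinD_eq_of c _ codes hne ?_ ?_
      · refine ⟨codes[codes.length - 1], List.getElem_mem _, ?_⟩
        have := hlt (codes.length - 1) hlast (by omega)
        rw [List.getD_eq_getElem codes 0 hlast]
        rcases abs_cases (c - codes[codes.length - 1]) with ⟨h1, h2⟩ | ⟨h1, h2⟩ <;> omega
      · intro g hg
        obtain ⟨j, hj, rfl⟩ := List.mem_iff_getElem.mp hg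
        have h1 := hlt j hj (by omega)
        have h2 := hmono j (codes.length - 1) hj hlast (by omega)
        rw [List.getD_eq_getElem codes 0 hlast]
        rcases abs_cases (c - codes[j]) with ⟨h3, h4⟩ | ⟨h3, h4⟩ <;> omega
    · simp only [if_neg hn]
      have hilt : i < codes.length := by omega
      have hi1 : i - 1 < codes.length := by omega
      have hlo := hlt (i - 1) hi1 (by omega)
      have hhi := hge i hilt (by omega)
      rw [List.getD_eq_getElem codes 0 hi1, List.getD_eq_getElem codes 0 hilt]
      refine pvMinD_eq_of c _ codes hne ?_ ?_
      · rcases le_total (c - codes[i-1]) (codes[i] - c) with h | h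
        · refine ⟨codes[i-1], List.getElem_mem _, ?_⟩
          rw [min_eq_left h]
          rcases abs_cases (c - codes[i-1]) with ⟨h1, h2⟩ | ⟨h1, h2⟩ <;> omega
        · refine ⟨codes[i], List.getElem_mem _, ?_⟩
          rw [min_eq_right h]
          rcases abs_cases (c - codes[i]) with ⟨h1, h2⟩ | ⟨h1, h2⟩ <;> omega
      · intro g hg
        obtain ⟨j, hj, rfl⟩ := List.mem_iff_getElem.mp hg
        rcases Nat.lt_or_ge j i with h | h
        · have h1 := hlt j hj h
          have h2 := hmono j (i - 1) hj hi1 (by omega)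
          have h3 := min_le_left (c - codes[i-1]) (codes[i] - c)
          rcases abs_cases (c - codes[j]) with ⟨h4, h5⟩ | ⟨h4, h5⟩ <;> omega
        · have h1 := hge j hj h
          have h2 := hmono i j hilt hj h
          have h3 := min_le_right (c - codes[i-1]) (codes[i] - c)
          rcases abs_cases (c - codes[j]) with ⟨h4, h5⟩ | ⟨h4, h5⟩ <;> omega

-- per-character agreement of the two contributions
lemma pvContrib_eq (gs : List Char) (hne : gs ≠ []) (ch : Char) :
    pvAltStep (PySem.Set.ofList gs)
      (PySem.List.sorted (PySem.Set.ofList (gs.map (fun g => ((g.toNat : Int))))) (fun x => x) false) 0 ch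
      = pvContribA gs ch := by
  set codes := PySem.List.sorted (PySem.Set.ofList (gs.map (fun g => ((g.toNat : Int))))) (fun x => x) false with hc
  have hmemcodes : ∀ x, x ∈ codes ↔ x ∈ gs.map (fun g => ((g.toNat : Int))) := by
    intro x
    rw [hc, PySem.List.mem_sorted, PySem.Set.mem_ofList]
  have hcontains : PySem.Set.contains (PySem.Set.ofList gs) ch = gs.contains ch := by
    simp only [PySem.Set.contains]
    by_cases h : ch ∈ gs
    · simp [(PySem.Set.mem_ofList gs ch).mpr h, h]
    · simp [h]
  by_cases hch : ch ∈ gs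
  · have hcon : gs.contains ch = true := by simpa using hch
    simp [pvAltStep, pvContribA, hch]
  · have hcon : gs.contains ch = false := by simpa using hch
    simp only [pvAltStep, pvContribA, hcontains, hcon, Bool.false_eq_true, if_false, zero_add]
    have hmne : gs.map (fun g => ((g.toNat : Int))) ≠ [] := by
      simp [hne]
    have hcne : codes ≠ [] := by
      rw [hc]
      intro hnil
      rw [PySem.List.sorted_eq_nil_iff] at hnil
      cases hmap : gs.map (fun g => ((g.toNat : Int))) with
      | nil => exact hmne hmap
      | cons a b =>
        have : a ∈ PySem.Set.ofList (gs.map (fun g => ((g.toNat : Int)))) := by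
          rw [PySem.Set.mem_ofList, hmap]; simp
        rw [hnil] at this
        exact absurd this (List.not_mem_nil)
    have hp : codes.Pairwise (· < ·) := by
      rw [hc]; exact PySem.List.sorted_ofList_pairwise_lt _
    rw [pvBisect_formula codes hp hcne ((ch.toNat : Int))]
    exact pvMinD_congr _ codes _ hcne hmne hmemcodes

-- ===== VERDICT (by name: the statement is the Claim_ definition above) =====
theorem totalDist_spec : Claim_equal_totalDist := by
  intro name GoodStr _hdom hpre
  unfold Spec_totalDist
  have hne : GoodStr.toList ≠ [] := fun h => hpre (String.toList_eq_nil_iff.mp h)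
  obtain ⟨p0, rest, hgl⟩ : ∃ p0 rest, GoodStr.toList = p0 :: rest := by
    cases h : GoodStr.toList with
    | nil => exact absurd h hne
    | cons a b => exact ⟨a, b, rfl⟩
  simp only [totalDist, totalDist_alt, hgl]
  rw [pvOuter_fst (p0 :: rest) (by simp) name.toList 0 p0]
  rw [pvAlt_fold]
  have hsum : ∀ chs, pvSumC (fun ch => pvAltStep (PySem.Set.ofList (p0 :: rest))
      (PySem.List.sorted (PySem.Set.ofList ((p0 :: rest).map (fun g => ((g.toNat : Int))))) (fun x => x) false) 0 ch) chs
      = pvSumC (pvContribA (p0 :: rest)) chs := by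
    intro chs
    induction chs with
    | nil => simp [pvSumC]
    | cons ch t ih =>
      simp only [pvSumC, ih]
      congr 1
      exact pvContrib_eq (p0 :: rest) (by simp) ch
  rw [hsum]
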